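-- pv_equiv track=rewrite | github.com/TurkuNLP/finngen-tools | preproc-tools/mask_numbers.py | mask_number
-- ===== SOURCE A (Python) =====
-- def mask_number(string, num_leading=2, replace_char='0'):
--     masked, digit_count = '', 0
--     for c in string:
--         if not c.isdigit():
--             masked += c
--         else:
--             if digit_count >= num_leading:
--                 masked += replace_char
--             else:
--                 masked += c
--             digit_count += 1
--     return masked
-- ===== SOURCE B (Python) =====
-- def mask_number(string, num_leading=2, replace_char='0'):
--     # Phase 1: find the index of the first digit to be masked (the
--     # (num_leading+1)-th digit); default past the end if never reached.
--     count = 0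
--     idx = len(string)
--     for i, c in enumerate(string):
--         if c.isdigit():
--             count += 1
--             if count > num_leading:
--                 idx = i
--                 break
--     # Phase 2: keep the prefix, mask every digit in the tail.
--     return string[:idx] + ''.join(
--         replace_char if c.isdigit() else c for c in string[idx:])
-- ===== Notes on version B (the rewrite author's own statement) =====
-- stated objective: alternative
-- what changed: Replaces the single fused per-character loop carrying a running string and digit counter by two phases: a boundary scan that finds the index of the first digit to mask, then a slice-and-join that copies the prefix verbatim and masks every digit of the tail (avoiding per-character string += concatenation).
import Mathlib
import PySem

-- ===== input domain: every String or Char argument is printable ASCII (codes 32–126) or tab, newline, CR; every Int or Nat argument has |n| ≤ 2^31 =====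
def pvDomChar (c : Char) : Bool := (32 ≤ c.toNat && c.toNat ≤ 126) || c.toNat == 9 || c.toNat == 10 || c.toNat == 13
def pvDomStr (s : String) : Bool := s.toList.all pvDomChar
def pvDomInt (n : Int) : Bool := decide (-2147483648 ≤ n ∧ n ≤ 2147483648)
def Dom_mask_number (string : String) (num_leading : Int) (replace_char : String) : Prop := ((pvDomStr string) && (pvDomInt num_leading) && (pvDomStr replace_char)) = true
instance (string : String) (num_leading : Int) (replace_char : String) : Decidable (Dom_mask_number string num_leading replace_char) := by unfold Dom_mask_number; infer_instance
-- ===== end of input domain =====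

-- B replaces A's fused per-character loop (running output string + digit counter) by a
-- boundary scan that finds the first masked digit's index followed by a slice-and-join
-- that masks every digit of the tail; objective: alternative decomposition, same O(n).


-- ===== PORT A =====
-- one loop-body step of A: masked/digit_count updates, branches in A's order
-- (c.isdigit on one char = PySem.Chars.isdigit; exact on the ASCII domain)
def pvStepA (num_leading : Int) (replace_char : String) (st : String × Int) (c : Char) : String × Int :=
  if !(PySem.Chars.isdigit c) then (st.1 ++ String.singleton c, st.2)
  else if st.2 ≥ num_leading then (st.1 ++ replace_char, st.2 + 1)
  else (st.1 ++ String.singleton c, st.2 + 1)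

def mask_number (string : String) (num_leading : Int) (replace_char : String) : String :=
  (string.toList.foldl (pvStepA num_leading replace_char) ("", 0)).1

-- ===== PORT B =====
-- boundary scan of Source B: number of characters before the first digit whose running count
-- exceeds num_leading (count incremented before the test); list length if never reached
def pvFindIdx (cs : List Char) (count num_leading : Int) : Nat :=
  match cs with
  | [] => 0
  | c :: rest =>
    if PySem.Chars.isdigit c then
      if count + 1 > num_leading then 0 else pvFindIdx rest (count + 1) num_leading + 1
    else pvFindIdx rest count num_leading + 1

-- string[:idx] / string[idx:] with 0 ≤ idx ≤ len are exactly take/drop on the char list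
def mask_number_alt (string : String) (num_leading : Int) (replace_char : String) : String :=
  let cs := string.toList
  let idx := pvFindIdx cs 0 num_leading
  String.ofList (cs.take idx) ++
    PySem.Str.join "" ((cs.drop idx).map (fun c => if PySem.Chars.isdigit c then replace_char else String.singleton c))

-- ===== PRECONDITION & SPEC =====
def Spec_mask_number (string : String) (num_leading : Int) (replace_char : String) (out : String) : Prop := out = mask_number_alt string num_leading replace_char
instance (string : String) (num_leading : Int) (replace_char : String) (out : String) : Decidable (Spec_mask_number string num_leading replace_char out) := by unfold Spec_mask_number; infer_instance

-- ===== CLAIM (what is proved, stated in full; the proofs are below) =====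
def Claim_equal_mask_number : Prop := ∀ (string : String) (num_leading : Int) (replace_char : String), Dom_mask_number string num_leading replace_char → Spec_mask_number string num_leading replace_char (mask_number string num_leading replace_char)

-- ===== LEMMAS AND PROOFS =====

-- list-level characterisation of A's loop output
def maskRecL (cs : List Char) (cnt nl : Int) (rc : List Char) : List Char :=
  match cs with
  | [] => []
  | c :: rest =>
    (if PySem.Chars.isdigit c then (if cnt ≥ nl then rc else [c]) else [c]) ++
      maskRecL rest (if PySem.Chars.isdigit c then cnt + 1 else cnt) nl rc

lemma foldA_toList (nl : Int) (rcS : String) :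
    ∀ (cs : List Char) (acc : String) (cnt : Int),
      ((cs.foldl (pvStepA nl rcS) (acc, cnt)).1).toList
        = acc.toList ++ maskRecL cs cnt nl rcS.toList := by
  intro cs
  induction cs with
  | nil => intro acc cnt; simp [maskRecL]
  | cons c rest ih =>
    intro acc cnt
    by_cases hd : PySem.Chars.isdigit c
    · by_cases hge : cnt ≥ nl
      · simp [List.foldl, pvStepA, hd, hge, maskRecL, ih]
      · simp [List.foldl, pvStepA, hd, hge, maskRecL, ih]
    · simp [List.foldl, pvStepA, hd, maskRecL, ih]

lemma join0_flatten (l : List (List Char)) : PySem.Chars.join [] l = l.flatten := by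
  unfold PySem.Chars.join List.intercalate
  induction l with
  | nil => simp
  | cons x l ih => cases l <;> simp_all [List.intersperse]

-- once the counter has reached nl, A masks every digit
lemma maskRecL_sat (nl : Int) (rc : List Char) :
    ∀ (cs : List Char) (cnt : Int), nl ≤ cnt →
      maskRecL cs cnt nl rc
        = (cs.map (fun c => if PySem.Chars.isdigit c then rc else [c])).flatten := by
  intro cs
  induction cs with
  | nil => intro cnt _; simp [maskRecL]
  | cons c rest ih =>
    intro cnt h
    by_cases hd : PySem.Chars.isdigit c
    · simp [maskRecL, hd, h, ih (cnt + 1) (by omega)]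
    · simp [maskRecL, hd, ih cnt h]

-- A's output = verbatim prefix up to the boundary, then uniform masking of the tail
lemma maskRecL_split (nl : Int) (rc : List Char) :
    ∀ (cs : List Char) (cnt : Int),
      maskRecL cs cnt nl rc
        = cs.take (pvFindIdx cs cnt nl)
          ++ ((cs.drop (pvFindIdx cs cnt nl)).map
                (fun c => if PySem.Chars.isdigit c then rc else [c])).flatten := by
  intro cs
  induction cs with
  | nil => intro cnt; simp [maskRecL, pvFindIdx]
  | cons c rest ih =>
    intro cnt
    by_cases hd : PySem.Chars.isdigit c
    · by_cases hgt : cnt + 1 > nl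
      · have hsat := maskRecL_sat nl rc (c :: rest) cnt (by omega)
        simp [pvFindIdx, hd, hgt, hsat]
      · have : ¬ cnt ≥ nl := by omega
        simp [maskRecL, pvFindIdx, hd, hgt, this, ih (cnt + 1)]
    · simp [maskRecL, pvFindIdx, hd, ih cnt]

-- ===== VERDICT (by name: the statement is the Claim_ definition above) =====
theorem mask_number_spec : Claim_equal_mask_number := by
  intro s nl rc _
  unfold Spec_mask_number
  rw [← String.toList_inj]
  unfold mask_number mask_number_alt
  rw [foldA_toList]
  rw [maskRecL_split nl rc.toList s.toList 0]
  simp only [String.toList_append, PySem.Str.toList_join, String.toList_ofList, List.map_map,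
    String.toList_empty, List.nil_append]
  rw [join0_flatten]
  congr 2
  congr 1
  funext c
  by_cases hd : PySem.Chars.isdigit c <;> simp [hd]
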